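-- pv_equiv track=rewrite | github.com/nick-github-sa/python50days | python40/python4.py | list_test
-- ===== SOURCE A (Python) =====
-- def list_test(string1, string2):
--     list_1 = []
--     list_2 = []
--     for char in string1:
--         list_1.append(char)
--     for char in string2:
--         list_2.append(char)
--     list_2.sort()
--
--     if list_1 == list_2:
--         return True
--     else:
--         return False
-- ===== SOURCE B (Python) =====
-- def list_test(string1, string2):
--     counts = {}
--     for char in string1:
--         counts[char] = counts.get(char, 0) + 1
--     for char in string2:
--         counts[char] = counts.get(char, 0) - 1
--     if any(v != 0 for v in counts.values()):
--         return False
--     return all(a <= b for a, b in zip(string1, string1[1:]))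
-- ===== Notes on version B (the rewrite author's own statement) =====
-- stated objective: alternative
-- what changed: B replaces 'build two lists, sort string2, compare' with a single character-frequency table (+1 for string1, -1 for string2) whose values must all be zero, plus an adjacent-pair scan checking string1 is non-decreasing.
import Mathlib
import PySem

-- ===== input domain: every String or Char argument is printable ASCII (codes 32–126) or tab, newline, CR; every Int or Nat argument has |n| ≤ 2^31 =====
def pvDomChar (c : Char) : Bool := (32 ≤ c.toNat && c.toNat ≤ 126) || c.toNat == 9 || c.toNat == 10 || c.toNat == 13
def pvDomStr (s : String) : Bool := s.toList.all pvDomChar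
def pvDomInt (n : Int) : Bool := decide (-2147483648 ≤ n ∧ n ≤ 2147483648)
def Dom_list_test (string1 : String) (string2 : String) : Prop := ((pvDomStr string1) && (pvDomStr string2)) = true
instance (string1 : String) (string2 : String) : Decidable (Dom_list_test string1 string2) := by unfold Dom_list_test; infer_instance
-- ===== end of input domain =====

-- B replaces A's sort-and-compare by a character-frequency table (+1/-1) that must be all zero plus an adjacent-pair non-decreasing scan of string1 (objective: alternative; not measured faster).

-- ===== PORT A =====
def list_test (string1 : String) (string2 : String) : Bool :=
  let list_1 := string1.toList.foldl (fun acc c => acc ++ [c]) []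
  let list_2 := string2.toList.foldl (fun acc c => acc ++ [c]) []
  let list_2 := PySem.List.sorted list_2 (fun x => x) false
  if list_1 = list_2 then true else false

-- ===== PORT B =====
def list_test_alt (string1 : String) (string2 : String) : Bool :=
  let counts : PySem.Dict Char Int :=
    string1.toList.foldl (fun d c => d.insert c (d.getD c 0 + 1)) PySem.Dict.empty
  let counts :=
    string2.toList.foldl (fun d c => d.insert c (d.getD c 0 - 1)) counts
  if counts.values.any (fun v => v ≠ 0) then false
  else (string1.toList.zip (PySem.List.slice string1.toList (some 1) none)).all
        (fun p => decide (p.1 ≤ p.2))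

-- ===== PRECONDITION & SPEC =====
def Spec_list_test (string1 : String) (string2 : String) (out : Bool) : Prop := out = list_test_alt string1 string2
instance (string1 : String) (string2 : String) (out : Bool) : Decidable (Spec_list_test string1 string2 out) := by unfold Spec_list_test; infer_instance

-- ===== CLAIM (what is proved, stated in full; the proofs are below) =====
def Claim_equal_list_test : Prop := ∀ (string1 : String) (string2 : String), Dom_list_test string1 string2 → Spec_list_test string1 string2 (list_test string1 string2)

-- ===== LEMMAS AND PROOFS =====

-- the '-1' twin of PySem.Dict.getD_foldl_insert_add_one, for B's second loop
theorem getD_foldl_insert_sub_one (l : List Char) (d : PySem.Dict Char Int) (v : Char) :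
    (l.foldl (fun d x => d.insert x (d.getD x 0 - 1)) d).getD v 0
      = d.getD v 0 - l.count v := by
  induction l generalizing d with
  | nil => simp
  | cons x t ih =>
    simp only [List.foldl_cons, ih, List.count_cons]
    by_cases hx : v = x
    · subst hx
      simp only [PySem.Dict.getD_insert_self, beq_self_eq_true, if_true]
      push_cast; ring
    · rw [PySem.Dict.getD_insert_of_ne _ _ _ hx]
      have hb : (x == v) = false := by simp [Ne.symm hx]
      simp [hb]

-- B's frequency table: each value is count in string1 minus count in string2
theorem counts_getD (l1 l2 : List Char) (v : Char) :
    ((l2.foldl (fun d c => d.insert c (d.getD c 0 - 1))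
        (l1.foldl (fun d c => d.insert c (d.getD c 0 + 1)) (PySem.Dict.empty : PySem.Dict Char Int))).getD v 0)
      = (l1.count v : Int) - l2.count v := by
  rw [getD_foldl_insert_sub_one, PySem.Dict.getD_foldl_insert_add_one]
  norm_num [PySem.Dict.getD_of_not_contains]

-- B's adjacent-pair scan checks exactly Pairwise (≤)
theorem zip_tail_all_iff (l : List Char) :
    ((l.zip l.tail).all (fun p => decide (p.1 ≤ p.2)) = true) ↔ l.Pairwise (· ≤ ·) := by
  rw [← List.isChain_iff_pairwise]
  induction l with
  | nil => simp
  | cons x t ih =>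
    cases t with
    | nil => simp
    | cons y u =>
      simp only [List.tail_cons, List.zip_cons_cons, List.all_cons, Bool.and_eq_true,
        decide_eq_true_eq, List.isChain_cons_cons]
      simp only [List.tail_cons] at ih
      rw [ih]

-- all table values zero ↔ the two strings are permutations of each other
theorem counts_zero_iff_perm (l1 l2 : List Char) :
    (((l2.foldl (fun d c => d.insert c (d.getD c 0 - 1))
        (l1.foldl (fun d c => d.insert c (d.getD c 0 + 1)) (PySem.Dict.empty : PySem.Dict Char Int))).values.any
          (fun v => v ≠ 0)) = false) ↔ l1.Perm l2 := by
  set d := (l2.foldl (fun d c => d.insert c (d.getD c 0 - 1))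
      (l1.foldl (fun d c => d.insert c (d.getD c 0 + 1)) (PySem.Dict.empty : PySem.Dict Char Int))) with hd
  have hnd : d.keys.Nodup := by
    rw [hd]
    exact PySem.Dict.nodup_keys_foldl_insert _ _ _
      (PySem.Dict.nodup_keys_foldl_insert _ _ _ (by simp [PySem.Dict.empty, PySem.Dict.keys]))
  have hkeys : ∀ c : Char, c ∈ d.keys ↔ c ∈ l1 ∨ c ∈ l2 := by
    intro c
    rw [hd, PySem.Dict.keys_foldl_insert, PySem.Set.mem_update,
      PySem.Dict.keys_foldl_insert, PySem.Set.mem_update]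
    simp [PySem.Dict.empty, PySem.Dict.keys]
  have hv : ∀ a : Char, d.getD a 0 = (l1.count a : Int) - l2.count a := by
    intro a; rw [hd]; exact counts_getD l1 l2 a
  rw [PySem.Dict.values_eq_map_keys d hnd 0, List.perm_iff_count]
  simp only [List.any_map, List.any_eq_false, Function.comp]
  constructor
  · intro h a
    by_cases ha : a ∈ d.keys
    · have := h a ha
      simp only [hv a, ne_eq, decide_eq_true_eq, Decidable.not_not] at this
      omega
    · rw [hkeys] at ha
      push Not at ha
      rw [List.count_eq_zero_of_not_mem ha.1, List.count_eq_zero_of_not_mem ha.2]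
  · intro h a _
    simp [hv a, h a]

-- ===== VERDICT (by name: the statement is the Claim_ definition above) =====
theorem list_test_spec : Claim_equal_list_test := by
  intro s1 s2 _
  unfold Spec_list_test list_test list_test_alt
  simp only [PySem.List.foldl_append_singleton_eq_self, List.nil_append]
  rw [PySem.List.slice_from s1.toList (a := 1) (by norm_num)]
  have h1 : (1 : Int).toNat = 1 := rfl
  rw [h1, List.drop_one]
  have hc := counts_zero_iff_perm s1.toList s2.toList
  by_cases hperm : s1.toList.Perm s2.toList
  · rw [hc.mpr hperm]
    simp only [Bool.false_eq_true, if_false]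
    by_cases hpw : s1.toList.Pairwise (· ≤ ·)
    · have hs : PySem.List.sorted s2.toList (fun x => x) false = s1.toList :=
        PySem.List.sorted_id_eq_of_perm_of_pairwise _ _ hperm hpw
      rw [hs, if_pos rfl]
      exact ((zip_tail_all_iff s1.toList).mpr hpw).symm
    · have hne : s1.toList ≠ PySem.List.sorted s2.toList (fun x => x) false := by
        intro he
        exact hpw (he ▸ PySem.List.sorted_pairwise s2.toList (fun x => x))
      rw [if_neg hne]
      have h2 := (zip_tail_all_iff s1.toList).not.mpr hpw
      simp only [Bool.not_eq_true] at h2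
      rw [h2]
  · have hct : (((s2.toList.foldl (fun d c => d.insert c (d.getD c 0 - 1))
        (s1.toList.foldl (fun d c => d.insert c (d.getD c 0 + 1))
          (PySem.Dict.empty : PySem.Dict Char Int))).values.any (fun v => v ≠ 0))) = true := by
      rcases Bool.eq_false_or_eq_true _ with h | h
      · exact h
      · exact absurd (hc.mp h) hperm
    rw [hct]
    simp only [if_true]
    have hne : s1.toList ≠ PySem.List.sorted s2.toList (fun x => x) false := by
      intro he
      exact hperm (he ▸ (PySem.List.sorted_perm s2.toList (fun x => x) false))
    rw [if_neg hne]
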